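-- pv_equiv track=rewrite | github.com/janezaletskaya/algorithms | algorithm_training_2024/week3/G_additional.py | mid_solution
-- ===== SOURCE A (Python) =====
-- def mid_solution(lst, b):
--     res = 0
--     pointer = 0
--     for i in range(len(lst)):
--         served = 0
--         cur_res = 0
--         while pointer <= i:
--             while served != b and lst[pointer] > 0:
--                 lst[pointer] -= 1
--                 served += 1
--                 cur_res += i - pointer + 1
--
--             if served == b:
--                 break
--
--             pointer += 1
--
--         res += cur_res
--
--     for i, customer in enumerate(lst[pointer:], start=pointer):
--         res += customer * (len(lst) - i + 1)
--
--     return res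
-- ===== SOURCE B (Python) =====
-- def mid_solution(lst, b):
--     n = len(lst)
--     res = 0
--     pointer = 0
--     for i in range(n):
--         served = 0
--         while pointer <= i and served != b:
--             cur = lst[pointer]
--             if cur > 0:
--                 gap = b - served
--                 take = gap if 0 <= gap <= cur else cur
--                 lst[pointer] = cur - take
--                 served += take
--                 res += take * (i - pointer + 1)
--             if served != b:
--                 pointer += 1
--     for i in range(pointer, n):
--         res += lst[i] * (n - i + 1)
--     return res
-- ===== Notes on version B (the rewrite author's own statement) =====
-- stated objective: faster
-- what changed: A serves one unit per iteration (decrementing lst[pointer] and incrementing counters unit by unit); B serves each customer in a single arithmetic batch (take = b-served if it stops the day, else the whole remaining amount), so the work per day is bounded by the number of pointer advances instead of the number of units served.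
import Mathlib
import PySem

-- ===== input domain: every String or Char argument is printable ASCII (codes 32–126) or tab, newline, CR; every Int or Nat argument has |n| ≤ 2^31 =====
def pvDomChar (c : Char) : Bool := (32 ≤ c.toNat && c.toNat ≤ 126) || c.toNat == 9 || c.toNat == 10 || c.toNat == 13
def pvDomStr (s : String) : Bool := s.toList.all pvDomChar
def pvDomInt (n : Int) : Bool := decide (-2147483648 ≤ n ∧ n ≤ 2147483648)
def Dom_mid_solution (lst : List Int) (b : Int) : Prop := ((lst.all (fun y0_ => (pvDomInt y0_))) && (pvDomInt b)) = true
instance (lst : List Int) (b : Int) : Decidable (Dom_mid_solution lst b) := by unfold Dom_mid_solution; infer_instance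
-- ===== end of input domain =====

-- B replaces A's unit-by-unit serving loop with one arithmetic batch per customer; both versions
-- mutate the Python list identically, and the theorems here are about the return value.

-- two facts the termination argument of pvAUnit cites
theorem pvGetD_pos_lt (l : List Int) (p : Nat) (h : l.getD p 0 > 0) : p < l.length := by
  by_contra hge
  rw [List.getD_eq_getElem?_getD, List.getElem?_eq_none (by omega)] at h
  simp [Option.getD] at h

theorem pvGetD_set_self (l : List Int) (p : Nat) (x : Int) (hp : p < l.length) :
    (l.set p x).getD p 0 = x := by
  rw [List.getD_eq_getElem?_getD, List.getElem?_set_eq_of_lt _ hp]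
  rfl

-- ===== PORT A =====
-- inner while: `while served != b and lst[pointer] > 0: lst[pointer]-=1; served+=1; cur_res += i-pointer+1`
-- (lst[pointer] is always read in range in A, so getD 0 is exact)
def pvAUnit (lst : List Int) (pointer i : Nat) (b served cur_res : Int) :
    List Int × Int × Int :=
  let v := lst.getD pointer 0
  if h : served ≠ b ∧ v > 0 then
    pvAUnit (lst.set pointer (v - 1)) pointer i b (served + 1)
      (cur_res + ((i : Int) - (pointer : Int) + 1))
  else (lst, served, cur_res)
termination_by (lst.getD pointer 0).toNat
decreasing_by
  have hp := pvGetD_pos_lt lst pointer h.2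
  rw [pvGetD_set_self lst pointer _ hp]
  omega

-- outer while: `while pointer <= i: <inner>; if served == b: break; pointer += 1`
def pvADay (lst : List Int) (pointer i : Nat) (b served cur_res : Int) :
    List Int × Nat × Int :=
  if h : pointer ≤ i then
    let r := pvAUnit lst pointer i b served cur_res
    if r.2.1 = b then (r.1, pointer, r.2.2)
    else pvADay r.1 (pointer + 1) i b r.2.1 r.2.2
  else (lst, pointer, cur_res)
termination_by i + 1 - pointer

def mid_solution (lst : List Int) (b : Int) : Int :=
  let n := lst.length
  let s := (List.range n).foldl
    (fun (st : List Int × Nat × Int) i =>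
      let r := pvADay st.1 st.2.1 i b 0 0
      (r.1, r.2.1, st.2.2 + r.2.2))
    (lst, 0, 0)
  -- `for i, customer in enumerate(lst[pointer:], start=pointer): res += customer*(len(lst)-i+1)`
  (PySem.List.enumerate (s.1.drop s.2.1) (s.2.1 : Int)).foldl
    (fun res p => res + p.2 * ((n : Int) - p.1 + 1)) s.2.2

-- ===== PORT B =====
-- `while pointer <= i and served != b: cur=lst[pointer]; if cur>0: gap=b-served;
--  take = gap if 0<=gap<=cur else cur; lst[pointer]=cur-take; served+=take;
--  res += take*(i-pointer+1); if served != b: pointer += 1`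
def pvBDay (lst : List Int) (pointer i : Nat) (b served res : Int) :
    List Int × Nat × Int :=
  if h : pointer ≤ i ∧ served ≠ b then
    let cur := lst.getD pointer 0
    let st :=
      if cur > 0 then
        let gap := b - served
        let take := if 0 ≤ gap ∧ gap ≤ cur then gap else cur
        (lst.set pointer (cur - take), served + take,
         res + take * ((i : Int) - (pointer : Int) + 1))
      else (lst, served, res)
    if st.2.1 ≠ b then pvBDay st.1 (pointer + 1) i b st.2.1 st.2.2
    else (st.1, pointer, st.2.2)
  else (lst, pointer, res)
termination_by i + 1 - pointer

def mid_solution_alt (lst : List Int) (b : Int) : Int :=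
  let n := lst.length
  let s := (List.range n).foldl
    (fun (st : List Int × Nat × Int) i =>
      let r := pvBDay st.1 st.2.1 i b 0 0
      (r.1, r.2.1, st.2.2 + r.2.2))
    (lst, 0, 0)
  -- `for i in range(pointer, n): res += lst[i] * (n - i + 1)`
  (List.range' s.2.1 (n - s.2.1)).foldl
    (fun res i => res + s.1.getD i 0 * ((n : Int) - (i : Int) + 1)) s.2.2

-- ===== PRECONDITION & SPEC =====
def Spec_mid_solution (lst : List Int) (b : Int) (out : Int) : Prop := out = mid_solution_alt lst b
instance (lst : List Int) (b : Int) (out : Int) : Decidable (Spec_mid_solution lst b out) := by unfold Spec_mid_solution; infer_instance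

-- ===== CLAIM (what is proved, stated in full; the proofs are below) =====
def Claim_equal_mid_solution : Prop := ∀ (lst : List Int) (b : Int), Dom_mid_solution lst b → Spec_mid_solution lst b (mid_solution lst b)

-- ===== LEMMAS AND PROOFS =====

-- the net effect of A's inner unit loop, as one arithmetic batch
def pvBatch (lst : List Int) (pointer i : Nat) (b served cur_res : Int) :
    List Int × Int × Int :=
  let v := lst.getD pointer 0
  if served ≠ b ∧ v > 0 then
    let gap := b - served
    let take := if 0 ≤ gap ∧ gap ≤ v then gap else v
    (lst.set pointer (v - take), served + take,
     cur_res + take * ((i : Int) - (pointer : Int) + 1))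
  else (lst, served, cur_res)

theorem pvBatch_step (lst : List Int) (pointer i : Nat) (b served cur_res : Int)
    (hs : served ≠ b) (hv : lst.getD pointer 0 > 0) :
    pvBatch (lst.set pointer (lst.getD pointer 0 - 1)) pointer i b (served + 1)
      (cur_res + ((i : Int) - (pointer : Int) + 1)) =
    pvBatch lst pointer i b served cur_res := by
  have hp : pointer < lst.length := pvGetD_pos_lt lst pointer hv
  have hset : (lst.set pointer (lst.getD pointer 0 - 1)).getD pointer 0
      = lst.getD pointer 0 - 1 := pvGetD_set_self _ _ _ hp
  simp only [pvBatch, hset, List.set_set]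
  set v := lst.getD pointer 0 with hvdef
  clear_value v
  set w := ((i : Int) - (pointer : Int) + 1) with hwdef
  clear_value w
  rw [if_pos (show served ≠ b ∧ v > 0 from ⟨hs, hv⟩)]
  by_cases h1 : served + 1 ≠ b ∧ v - 1 > 0
  · rw [if_pos h1]
    by_cases h2 : 0 ≤ b - (served + 1) ∧ b - (served + 1) ≤ v - 1
    · rw [if_pos h2, if_pos (show 0 ≤ b - served ∧ b - served ≤ v from by omega)]
      refine Prod.ext ?_ (Prod.ext ?_ ?_) <;>
        first | rfl | ring
    · rw [if_neg h2, if_neg (show ¬ (0 ≤ b - served ∧ b - served ≤ v) from by omega)]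
      refine Prod.ext ?_ (Prod.ext ?_ ?_) <;>
        first | rfl | ring
  · rw [if_neg h1]
    by_cases h2 : 0 ≤ b - served ∧ b - served ≤ v
    · rw [if_pos h2]
      rw [show b - served = (1 : Int) from by omega]
      refine Prod.ext ?_ (Prod.ext ?_ ?_) <;>
        first | rfl | ring
    · rw [if_neg h2]
      rw [show v = (1 : Int) from by omega]
      refine Prod.ext ?_ (Prod.ext ?_ ?_) <;>
        first | rfl | ring

theorem pvUnit_eq_batch (pointer i : Nat) (b : Int) :
    ∀ (n : Nat) (lst : List Int) (served cur_res : Int),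
      (lst.getD pointer 0).toNat ≤ n →
      pvAUnit lst pointer i b served cur_res = pvBatch lst pointer i b served cur_res := by
  intro n
  induction n with
  | zero =>
    intro lst served cur_res hn
    have hneg : ¬ (served ≠ b ∧ lst.getD pointer 0 > 0) := by
      rintro ⟨-, hpos⟩; omega
    rw [pvAUnit]
    simp only [pvBatch]
    rw [dif_neg hneg, if_neg hneg]
  | succ n ih =>
    intro lst served cur_res hn
    by_cases h : served ≠ b ∧ lst.getD pointer 0 > 0
    · rw [pvAUnit]
      rw [dif_pos h]
      rw [ih _ _ _ (by
        rw [pvGetD_set_self lst pointer _ (pvGetD_pos_lt lst pointer h.2)]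
        omega)]
      exact pvBatch_step lst pointer i b served cur_res h.1 h.2
    · rw [pvAUnit]
      simp only [pvBatch]
      rw [dif_neg h, if_neg h]

theorem pvUnit_eq_batch' (lst : List Int) (pointer i : Nat) (b served cur_res : Int) :
    pvAUnit lst pointer i b served cur_res = pvBatch lst pointer i b served cur_res :=
  pvUnit_eq_batch pointer i b _ lst served cur_res le_rfl

-- one-step unfolding of pvADay with the projections written out
theorem pvADay_eq_step (lst : List Int) (pointer i : Nat) (b served cur_res : Int) :
    pvADay lst pointer i b served cur_res =
      if _h : pointer ≤ i then
        (if (pvAUnit lst pointer i b served cur_res).2.1 = b then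
          ((pvAUnit lst pointer i b served cur_res).1, pointer,
           (pvAUnit lst pointer i b served cur_res).2.2)
        else
          pvADay (pvAUnit lst pointer i b served cur_res).1 (pointer + 1) i b
            (pvAUnit lst pointer i b served cur_res).2.1
            (pvAUnit lst pointer i b served cur_res).2.2)
      else (lst, pointer, cur_res) := by
  rw [pvADay]

-- the body of B's loop iteration (cur/gap/take written out)
def pvBStep (lst : List Int) (pointer i : Nat) (b served res : Int) :
    List Int × Int × Int :=
  if lst.getD pointer 0 > 0 then
    (lst.set pointer (lst.getD pointer 0 -
       (if 0 ≤ b - served ∧ b - served ≤ lst.getD pointer 0 then b - served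
        else lst.getD pointer 0)),
     served + (if 0 ≤ b - served ∧ b - served ≤ lst.getD pointer 0 then b - served
        else lst.getD pointer 0),
     res + (if 0 ≤ b - served ∧ b - served ≤ lst.getD pointer 0 then b - served
        else lst.getD pointer 0) * ((i : Int) - (pointer : Int) + 1))
  else (lst, served, res)

theorem pvBDay_eq_step (lst : List Int) (pointer i : Nat) (b served res : Int) :
    pvBDay lst pointer i b served res =
      if _h : pointer ≤ i ∧ served ≠ b then
        (if (pvBStep lst pointer i b served res).2.1 ≠ b then
          pvBDay (pvBStep lst pointer i b served res).1 (pointer + 1) i b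
            (pvBStep lst pointer i b served res).2.1
            (pvBStep lst pointer i b served res).2.2
        else
          ((pvBStep lst pointer i b served res).1, pointer,
           (pvBStep lst pointer i b served res).2.2))
      else (lst, pointer, res) := by
  rw [pvBDay]
  rfl

theorem pvBStep_eq_batch (lst : List Int) (pointer i : Nat) (b served res : Int)
    (hsb : served ≠ b) :
    pvBStep lst pointer i b served res = pvBatch lst pointer i b served res := by
  simp only [pvBStep, pvBatch]
  by_cases hc : lst.getD pointer 0 > 0
  · rw [if_pos hc, if_pos (show served ≠ b ∧ lst.getD pointer 0 > 0 from ⟨hsb, hc⟩)]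
  · rw [if_neg hc, if_neg (by rintro ⟨-, h2⟩; exact hc h2)]

theorem pvDay_eq_fuel (i : Nat) (b : Int) :
    ∀ (fuel : Nat) (lst : List Int) (pointer : Nat) (served cur_res : Int),
      i + 1 - pointer ≤ fuel →
      pvADay lst pointer i b served cur_res = pvBDay lst pointer i b served cur_res := by
  intro fuel
  induction fuel with
  | zero =>
    intro lst pointer served cur_res hf
    have hpi : ¬ pointer ≤ i := by omega
    rw [pvADay_eq_step, pvBDay_eq_step]
    rw [dif_neg hpi, dif_neg (by rintro ⟨h1, -⟩; exact hpi h1)]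
  | succ fuel ih =>
    intro lst pointer served cur_res hf
    by_cases hpi : pointer ≤ i
    · by_cases hsb : served = b
      · rw [pvADay_eq_step, pvBDay_eq_step]
        rw [dif_pos hpi, dif_neg (by rintro ⟨-, h2⟩; exact h2 hsb)]
        rw [pvUnit_eq_batch']
        have hr : pvBatch lst pointer i b served cur_res = (lst, served, cur_res) := by
          simp only [pvBatch]
          rw [if_neg (by rintro ⟨h1, -⟩; exact h1 hsb)]
        rw [hr]
        simp [hsb]
      · rw [pvADay_eq_step, pvBDay_eq_step]
        rw [dif_pos hpi, dif_pos (show pointer ≤ i ∧ served ≠ b from ⟨hpi, hsb⟩)]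
        rw [pvUnit_eq_batch', pvBStep_eq_batch lst pointer i b served cur_res hsb]
        by_cases hz : (pvBatch lst pointer i b served cur_res).2.1 = b
        · rw [if_pos hz, if_neg (not_not_intro hz)]
        · rw [if_neg hz, if_pos hz]
          exact ih _ (pointer + 1) _ _ (by omega)
    · rw [pvADay_eq_step, pvBDay_eq_step]
      rw [dif_neg hpi, dif_neg (by rintro ⟨h1, -⟩; exact hpi h1)]

theorem pvDay_eq (lst : List Int) (pointer i : Nat) (b served cur_res : Int) :
    pvADay lst pointer i b served cur_res = pvBDay lst pointer i b served cur_res :=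
  pvDay_eq_fuel i b (i + 1 - pointer) lst pointer served cur_res le_rfl

theorem pvBStep_len (lst : List Int) (pointer i : Nat) (b served res : Int) :
    (pvBStep lst pointer i b served res).1.length = lst.length := by
  rw [pvBStep]
  split <;> simp

-- length and pointer invariants of B's day loop
theorem pvBDay_len (i : Nat) (b : Int) :
    ∀ (fuel : Nat) (lst : List Int) (pointer : Nat) (served res : Int),
      i + 1 - pointer ≤ fuel →
      (pvBDay lst pointer i b served res).1.length = lst.length := by
  intro fuel
  induction fuel with
  | zero =>
    intro lst pointer served res hf
    rw [pvBDay_eq_step, dif_neg (by rintro ⟨h1, -⟩; omega)]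
  | succ fuel ih =>
    intro lst pointer served res hf
    rw [pvBDay_eq_step]
    by_cases h : pointer ≤ i ∧ served ≠ b
    · rw [dif_pos h]
      by_cases hz : (pvBStep lst pointer i b served res).2.1 ≠ b
      · rw [if_pos hz]
        rw [ih _ (pointer + 1) _ _ (by omega)]
        exact pvBStep_len lst pointer i b served res
      · rw [if_neg hz]
        exact pvBStep_len lst pointer i b served res
    · rw [dif_neg h]

theorem pvBDay_ptr (i : Nat) (b : Int) :
    ∀ (fuel : Nat) (lst : List Int) (pointer : Nat) (served res : Int),
      i + 1 - pointer ≤ fuel → pointer ≤ i + 1 →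
      (pvBDay lst pointer i b served res).2.1 ≤ i + 1 := by
  intro fuel
  induction fuel with
  | zero =>
    intro lst pointer served res hf hp
    rw [pvBDay_eq_step, dif_neg (by rintro ⟨h1, -⟩; omega)]
    exact hp
  | succ fuel ih =>
    intro lst pointer served res hf hp
    rw [pvBDay_eq_step]
    by_cases h : pointer ≤ i ∧ served ≠ b
    · rw [dif_pos h]
      by_cases hz : (pvBStep lst pointer i b served res).2.1 ≠ b
      · rw [if_pos hz]
        exact ih _ (pointer + 1) _ _ (by omega) (by omega)
      · rw [if_neg hz]
        exact hp
    · rw [dif_neg h]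
      exact hp

-- the day fold of mid_solution_alt, named for the induction
def pvFoldB (lst0 : List Int) (b : Int) (m : Nat) : List Int × Nat × Int :=
  (List.range m).foldl
    (fun (st : List Int × Nat × Int) i =>
      let r := pvBDay st.1 st.2.1 i b 0 0
      (r.1, r.2.1, st.2.2 + r.2.2))
    (lst0, 0, 0)

theorem pvFoldB_inv (lst0 : List Int) (b : Int) :
    ∀ (m : Nat), (pvFoldB lst0 b m).1.length = lst0.length ∧ (pvFoldB lst0 b m).2.1 ≤ m := by
  intro m
  induction m with
  | zero => simp [pvFoldB]
  | succ m ih =>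
    have hstep : pvFoldB lst0 b (m + 1) =
        (let st := pvFoldB lst0 b m
         let r := pvBDay st.1 st.2.1 m b 0 0
         (r.1, r.2.1, st.2.2 + r.2.2)) := by
      simp only [pvFoldB, List.range_succ, List.foldl_append, List.foldl_cons, List.foldl_nil]
    rw [hstep]
    constructor
    · show (pvBDay (pvFoldB lst0 b m).1 (pvFoldB lst0 b m).2.1 m b 0 0).1.length = lst0.length
      rw [pvBDay_len m b (m + 1 - (pvFoldB lst0 b m).2.1) _ _ _ _ le_rfl]
      exact ih.1
    · show (pvBDay (pvFoldB lst0 b m).1 (pvFoldB lst0 b m).2.1 m b 0 0).2.1 ≤ m + 1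
      exact pvBDay_ptr m b (m + 1 - (pvFoldB lst0 b m).2.1) _ _ _ _ le_rfl (by omega)

-- the two residual loops agree when k ≤ n = l.length
theorem pvResidual_eq (l : List Int) (n : Nat) (hn : l.length = n) :
    ∀ (d k : Nat) (acc : Int), k + d = n →
      (PySem.List.enumerate (l.drop k) (k : Int)).foldl
        (fun res p => res + p.2 * ((n : Int) - p.1 + 1)) acc =
      (List.range' k d).foldl
        (fun res i => res + l.getD i 0 * ((n : Int) - (i : Int) + 1)) acc := by
  intro d
  induction d with
  | zero =>
    intro k acc hk
    rw [List.drop_eq_nil_of_le (by omega)]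
    simp [PySem.List.enumerate]
  | succ d ih =>
    intro k acc hk
    have hkl : k < l.length := by omega
    rw [List.drop_eq_getElem_cons hkl, PySem.List.enumerate_cons, List.range'_succ,
        List.foldl_cons, List.foldl_cons]
    have hgd : l.getD k 0 = l[k] := by
      rw [List.getD_eq_getElem?_getD, List.getElem?_eq_getElem hkl]
      rfl
    rw [hgd]
    have hcast : ((k : Int) + 1) = ((k + 1 : Nat) : Int) := by push_cast; ring
    rw [hcast]
    exact ih (k + 1) _ (by omega)

-- ===== VERDICT (by name: the statement is the Claim_ definition above) =====
theorem mid_solution_spec : Claim_equal_mid_solution := by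
  intro lst b _
  show mid_solution lst b = mid_solution_alt lst b
  have hfun : (fun (st : List Int × Nat × Int) i =>
      let r := pvADay st.1 st.2.1 i b 0 0
      (r.1, r.2.1, st.2.2 + r.2.2)) =
      (fun (st : List Int × Nat × Int) i =>
      let r := pvBDay st.1 st.2.1 i b 0 0
      (r.1, r.2.1, st.2.2 + r.2.2)) := by
    funext st i
    simp only [pvDay_eq]
  have hinv := pvFoldB_inv lst b lst.length
  simp only [mid_solution, mid_solution_alt, hfun]
  have hs : (List.range lst.length).foldl
      (fun (st : List Int × Nat × Int) i =>
        let r := pvBDay st.1 st.2.1 i b 0 0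
        (r.1, r.2.1, st.2.2 + r.2.2))
      (lst, 0, 0) = pvFoldB lst b lst.length := rfl
  rw [hs]
  have hlen : (pvFoldB lst b lst.length).1.length = lst.length := hinv.1
  have hptr : (pvFoldB lst b lst.length).2.1 ≤ lst.length := hinv.2
  exact pvResidual_eq (pvFoldB lst b lst.length).1 lst.length hlen
    (lst.length - (pvFoldB lst b lst.length).2.1) (pvFoldB lst b lst.length).2.1 _ (by omega)
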